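-- pv_equiv track=rewrite | github.com/nicloh-afk/tcx1002 | mocktest9.py | encode_parity
-- ===== SOURCE A (Python) =====
-- def encode_parity(num):
--   # base case
--   if num<10:
--     if num%2==0: parity='E'
--     else: parity ='O'
--     return [(parity,1)]
--
--   #120047 -> 12004 ,  7
--   rest , next = encode_parity(num//10), num%10
--   if next%2==0:
--     parity = 'E'
--   else: parity = 'O'
--
--   if rest[-1][0] == parity:
--     rest[-1] = (rest[-1][0], rest[-1][1]+1) #update
--   else:
--     rest.append((parity, 1))
--   return rest
-- ===== SOURCE B (Python) =====
-- def encode_parity(num):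
--     if num < 10:
--         return [('E' if num % 2 == 0 else 'O', 1)]
--     # extract digit parities least-significant-first, iteratively
--     parities = []
--     while num > 0:
--         num, d = divmod(num, 10)
--         parities.append('E' if d % 2 == 0 else 'O')
--     parities.reverse()
--     # run-length encode in one forward pass
--     out = []
--     for p in parities:
--         if out and out[-1][0] == p:
--             out[-1] = (out[-1][0], out[-1][1] + 1)
--         else:
--             out.append((p, 1))
--     return out
-- ===== Notes on version B (the rewrite author's own statement) =====
-- stated objective: alternative
-- what changed: Replaced A's recursion (recurse on num//10, then patch the last run of the returned list) by an iterative two-phase pass: extract digit parities with divmod into a list, reverse it, then run-length encode it in one forward loop.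
import Mathlib
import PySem

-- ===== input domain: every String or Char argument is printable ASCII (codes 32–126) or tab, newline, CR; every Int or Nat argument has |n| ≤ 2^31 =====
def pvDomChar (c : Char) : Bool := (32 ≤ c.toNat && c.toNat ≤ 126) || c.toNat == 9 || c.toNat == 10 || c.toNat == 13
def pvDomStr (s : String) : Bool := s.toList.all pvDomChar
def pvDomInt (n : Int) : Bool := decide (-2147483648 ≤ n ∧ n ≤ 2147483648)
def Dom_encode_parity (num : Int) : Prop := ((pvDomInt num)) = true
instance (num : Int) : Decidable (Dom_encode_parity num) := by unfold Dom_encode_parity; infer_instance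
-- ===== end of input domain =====

-- B replaces A's recursion-with-patching by an iterative divmod digit-parity extraction
-- followed by a single forward run-length-encoding pass (alternative decomposition, same cost).

-- ===== PORT A =====
def encode_parity (num : Int) : List (String × Int) :=
  if _h : num < 10 then
    [((if PySem.Int.mod num 2 == 0 then "E" else "O"), 1)]
  else
    let rest := encode_parity (PySem.Int.floordiv num 10)
    let next := PySem.Int.mod num 10
    let parity := if PySem.Int.mod next 2 == 0 then "E" else "O"
    match PySem.List.pyGet? rest (-1) with
    | some last =>
        if last.1 == parity then rest.dropLast ++ [(last.1, last.2 + 1)]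
        else rest ++ [(parity, 1)]
    | none => []   -- unreachable: encode_parity always returns a nonempty list
termination_by num.toNat
decreasing_by
  rw [PySem.Int.floordiv_eq_ediv_of_pos (by norm_num)]
  omega

-- ===== PORT B =====
-- the 'while num > 0' divmod loop of Source B, collecting parities least-significant-first
def pvDigitParities (num : Int) : List String :=
  if _h : num > 0 then
    (if PySem.Int.mod (PySem.Int.mod num 10) 2 == 0 then "E" else "O")
      :: pvDigitParities (PySem.Int.floordiv num 10)
  else []
termination_by num.toNat
decreasing_by
  rw [PySem.Int.floordiv_eq_ediv_of_pos (by norm_num)]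
  omega

-- one step of Source B's run-length-encoding 'for p in parities' loop
def pvRleStep (out : List (String × Int)) (p : String) : List (String × Int) :=
  match out.getLast? with
  | some last => if last.1 == p then out.dropLast ++ [(last.1, last.2 + 1)]
                 else out ++ [(p, 1)]
  | none => [(p, 1)]

def encode_parity_alt (num : Int) : List (String × Int) :=
  if num < 10 then
    [((if PySem.Int.mod num 2 == 0 then "E" else "O"), 1)]
  else
    ((pvDigitParities num).reverse).foldl pvRleStep []

-- ===== PRECONDITION & SPEC =====
def Spec_encode_parity (num : Int) (out : List (String × Int)) : Prop := out = encode_parity_alt num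
instance (num : Int) (out : List (String × Int)) : Decidable (Spec_encode_parity num out) := by unfold Spec_encode_parity; infer_instance

-- ===== CLAIM (what is proved, stated in full; the proofs are below) =====
def Claim_equal_encode_parity : Prop := ∀ (num : Int), Dom_encode_parity num → Spec_encode_parity num (encode_parity num)

-- ===== LEMMAS AND PROOFS =====

theorem pvRleStep_ne_nil (out : List (String × Int)) (p : String) : pvRleStep out p ≠ [] := by
  unfold pvRleStep
  split
  · split <;> simp
  · simp

theorem pvFoldl_rle_ne_nil (l : List String) (init : List (String × Int)) (h : l ≠ []) :
    l.foldl pvRleStep init ≠ [] := by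
  induction l generalizing init with
  | nil => exact absurd rfl h
  | cons p rest ih =>
    cases rest with
    | nil => simpa [List.foldl] using pvRleStep_ne_nil init p
    | cons q r => exact ih (pvRleStep init p) (by simp)

theorem pvMain (n : Nat) : ∀ num : Int, num.toNat = n → 0 < num →
    encode_parity num = ((pvDigitParities num).reverse).foldl pvRleStep [] := by
  induction n using Nat.strong_induction_on with
  | _ n IH =>
    intro num hn hpos
    have h10 : PySem.Int.floordiv num 10 = num / 10 :=
      PySem.Int.floordiv_eq_ediv_of_pos (by norm_num)
    have hm10 : PySem.Int.mod num 10 = num % 10 :=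
      PySem.Int.mod_eq_emod_of_pos (by norm_num)
    by_cases hlt : num < 10
    · -- 1 ≤ num ≤ 9 : one digit
      have hq0 : PySem.Int.floordiv num 10 = 0 := by rw [h10]; omega
      have hm : PySem.Int.mod num 10 = num := by rw [hm10]; omega
      rw [encode_parity, dif_pos hlt]
      rw [pvDigitParities, dif_pos hpos, hq0, hm]
      rw [pvDigitParities]
      simp [pvRleStep]
    · -- num ≥ 10 : peel the last digit
      have hqpos : 0 < PySem.Int.floordiv num 10 := by rw [h10]; omega
      have hqlt : (PySem.Int.floordiv num 10).toNat < n := by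
        rw [h10]; omega
      have ihq := IH _ hqlt (PySem.Int.floordiv num 10) rfl hqpos
      have hqne : pvDigitParities (PySem.Int.floordiv num 10) ≠ [] := by
        rw [pvDigitParities, dif_pos hqpos]; simp
      have hrestne : encode_parity (PySem.Int.floordiv num 10) ≠ [] := by
        rw [ihq]
        exact pvFoldl_rle_ne_nil _ _ (by simpa using hqne)
      rw [encode_parity, dif_neg hlt]
      rw [pvDigitParities, dif_pos hpos]
      rw [List.reverse_cons, List.foldl_append, ← ihq]
      simp only [List.foldl_cons, List.foldl_nil]
      -- both sides now step the same parity onto 'rest'; show A's step = pvRleStep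
      set rest := encode_parity (PySem.Int.floordiv num 10) with hrest
      set p := (if PySem.Int.mod (PySem.Int.mod num 10) 2 == 0 then "E" else "O") with hp
      rw [PySem.List.pyGet?_neg_one]
      unfold pvRleStep
      cases hgl : rest.getLast? with
      | none => exact absurd (List.getLast?_eq_none_iff.mp hgl) hrestne
      | some last => rfl

-- ===== VERDICT (by name: the statement is the Claim_ definition above) =====
theorem encode_parity_spec : Claim_equal_encode_parity := by
  intro num _
  unfold Spec_encode_parity encode_parity_alt
  by_cases hlt : num < 10
  · rw [if_pos hlt, encode_parity, dif_pos hlt]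
  · rw [if_neg hlt]
    exact pvMain num.toNat num rfl (by omega)
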